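-- pv_equiv track=rewrite | github.com/Jianhong-Gao/LabelSIG | labelsig/utils/utils_datasets.py | find_id_of_U0_I0
-- ===== SOURCE A (Python) =====
-- class CustomError(Exception):
--     pass
--
-- def find_id_of_U0_I0(analog_channel_ids):
--     nickname_U0=['UZ','Uz','U0']
--     nickname_I0=['IZ','Iz','I0']
--     id_U0,id_I0=None,None
--     for i,channel_name in enumerate(analog_channel_ids):
--             for name_U0 in nickname_U0:
--                 if name_U0 in channel_name:
--                     id_U0 = i
--             for name_I0 in nickname_I0:
--                 if name_I0 in channel_name:
--                     id_I0 = i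
--     if id_U0 and id_I0:
--         return id_U0,id_I0
--     else:
--         raise CustomError('未找到零序电压或零序电流通道')
-- ===== SOURCE B (Python) =====
-- class CustomError(Exception):
--     pass
--
-- def _flags(name):
--     # every nickname is 'U' or 'I' followed by one of 'Z', 'z', '0':
--     # one scan over adjacent character pairs decides both matches at once
--     pairs = list(zip(name, name[1:]))
--     has_u = any(a == 'U' and b in 'Zz0' for a, b in pairs)
--     has_i = any(a == 'I' and b in 'Zz0' for a, b in pairs)
--     return has_u, has_i
--
-- def find_id_of_U0_I0(analog_channel_ids):
--     # walk from the END and keep the first match seen (= last match), breaking early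
--     id_U0 = None
--     id_I0 = None
--     for i in range(len(analog_channel_ids) - 1, -1, -1):
--         has_u, has_i = _flags(analog_channel_ids[i])
--         if id_U0 is None and has_u:
--             id_U0 = i
--         if id_I0 is None and has_i:
--             id_I0 = i
--         if id_U0 is not None and id_I0 is not None:
--             break
--     if id_U0 is None or id_I0 is None:
--         raise CustomError('未找到零序电压或零序电流通道')
--     return id_U0, id_I0
-- ===== Notes on version B (the rewrite author's own statement) =====
-- stated objective: alternative
-- what changed: B scans the list from the end with an early break (first match from the back = A's last match) and decides each channel's match by a single pass over adjacent character pairs (every nickname is 'U' or 'I' followed by one of 'Z','z','0') instead of A's forward overwrite scan with three substring tests per name.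
import Mathlib
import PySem

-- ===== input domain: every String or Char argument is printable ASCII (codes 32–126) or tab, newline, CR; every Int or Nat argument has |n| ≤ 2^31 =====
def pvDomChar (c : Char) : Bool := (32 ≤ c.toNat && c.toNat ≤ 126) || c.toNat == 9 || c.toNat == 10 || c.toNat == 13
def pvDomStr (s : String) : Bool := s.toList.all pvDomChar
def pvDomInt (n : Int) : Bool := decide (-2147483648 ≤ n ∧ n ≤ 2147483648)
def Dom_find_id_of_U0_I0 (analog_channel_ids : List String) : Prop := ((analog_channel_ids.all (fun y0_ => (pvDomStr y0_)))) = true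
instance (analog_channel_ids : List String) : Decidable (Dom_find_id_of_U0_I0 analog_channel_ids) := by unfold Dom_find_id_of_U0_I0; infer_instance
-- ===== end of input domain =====

-- B walks the list from the END with early exit and decides each match by one scan over
-- adjacent character pairs (every nickname is 'U'/'I' followed by 'Z','z' or '0'), instead
-- of A's forward overwrite scan with three substring tests per prefix (objective: alternative);
-- where A raises CustomError nothing is claimed (Pre_).


-- ===== PORT A =====
-- literal port: forward nested loops, each nickname substring match overwrites id_U0/id_I0
-- with the current index; the raise branch (falsy id_U0/id_I0, i.e. None or 0) returns the
-- dummy (0,0), excluded by Pre_.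
def find_id_of_U0_I0 (analog_channel_ids : List String) : Int × Int :=
  let nickname_U0 : List String := ["UZ", "Uz", "U0"]
  let nickname_I0 : List String := ["IZ", "Iz", "I0"]
  let st := (PySem.List.enumerate analog_channel_ids 0).foldl
    (fun (acc : Option Int × Option Int) p =>
      let id_U0 := nickname_U0.foldl
        (fun s name_U0 => if PySem.Str.isIn name_U0 p.2 then some p.1 else s) acc.1
      let id_I0 := nickname_I0.foldl
        (fun s name_I0 => if PySem.Str.isIn name_I0 p.2 then some p.1 else s) acc.2
      (id_U0, id_I0)) (none, none)
  match st with
  | (some a, some b) => if a ≠ 0 ∧ b ≠ 0 then (a, b) else (0, 0)   -- 'if id_U0 and id_I0' truthiness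
  | _ => (0, 0)                                                     -- raise CustomError

-- ===== PORT B =====
-- b in 'Zz0'
def pvInZ (c : Char) : Bool := c == 'Z' || c == 'z' || c == '0'

-- any(a == u and b in 'Zz0' for a, b in zip(name, name[1:]))
def pvHasAdj (u : Char) (cs : List Char) : Bool :=
  (cs.zip cs.tail).any (fun p => p.1 == u && pvInZ p.2)

-- _flags(name)
def pvFlags (name : String) : Bool × Bool :=
  (pvHasAdj 'U' name.toList, pvHasAdj 'I' name.toList)

-- the reverse loop with early break; the index i is always in range, so pyGetD is exact there
def pvLoopB (xs : List String) : List Int → Option Int → Option Int → Option Int × Option Int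
  | [], u, v => (u, v)
  | i :: rest, u, v =>
    let f := pvFlags (PySem.List.pyGetD xs i "")
    let u' := if u.isNone && f.1 then some i else u
    let v' := if v.isNone && f.2 then some i else v
    if u'.isSome && v'.isSome then (u', v')                         -- break
    else pvLoopB xs rest u' v'

def find_id_of_U0_I0_alt (analog_channel_ids : List String) : Int × Int :=
  let r := pvLoopB analog_channel_ids
    (PySem.List.pyRange (PySem.List.len analog_channel_ids - 1) (-1) (-1)) none none
  match r.1 with
  | none => (0, 0)                                                  -- raise CustomError
  | some a =>
    match r.2 with
    | none => (0, 0)                                                -- raise CustomError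
    | some b => (a, b)

-- ===== PRECONDITION & SPEC =====
-- Pre_: exactly the inputs where A returns normally: some channel at index ≥ 1 contains a U0
-- nickname and some channel at index ≥ 1 contains an I0 nickname (index 0 is falsy in A's guard).
def Pre_find_id_of_U0_I0 (analog_channel_ids : List String) : Prop :=
  ((analog_channel_ids.drop 1).any
      (fun name => (["UZ", "Uz", "U0"] : List String).any (fun n => PySem.Str.isIn n name))
    ∧ (analog_channel_ids.drop 1).any
      (fun name => (["IZ", "Iz", "I0"] : List String).any (fun n => PySem.Str.isIn n name)))
instance (analog_channel_ids : List String) : Decidable (Pre_find_id_of_U0_I0 analog_channel_ids) := by unfold Pre_find_id_of_U0_I0; infer_instance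
def pvWitness_find_id_of_U0_I0 : List String := ["x", "ch U0", "ch I0"]

def Spec_find_id_of_U0_I0 (analog_channel_ids : List String) (out : Int × Int) : Prop := out = find_id_of_U0_I0_alt analog_channel_ids
instance (analog_channel_ids : List String) (out : Int × Int) : Decidable (Spec_find_id_of_U0_I0 analog_channel_ids out) := by unfold Spec_find_id_of_U0_I0; infer_instance

-- ===== CLAIM (what is proved, stated in full; the proofs are below) =====
def Claim_equal_find_id_of_U0_I0 : Prop := ∀ (analog_channel_ids : List String), Dom_find_id_of_U0_I0 analog_channel_ids → Pre_find_id_of_U0_I0 analog_channel_ids → Spec_find_id_of_U0_I0 analog_channel_ids (find_id_of_U0_I0 analog_channel_ids)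
-- ===== LEMMAS AND PROOFS =====

-- any(n in name for n in nicks)
def pvMatchAny (nicks : List String) (name : String) : Bool :=
  nicks.any (fun n => PySem.Str.isIn n name)

-- the last-match index lists A's forward scan is about
def pvHits (nicks : List String) (xs : List String) (s : Int) : List Int :=
  (PySem.List.enumerate xs s).filterMap (fun p => if pvMatchAny nicks p.2 then some p.1 else none)

-- A's inner nickname loop overwrites with some i exactly when some nickname matches
theorem foldl_nick (nicks : List String) (name : String) (i : Int) (a0 : Option Int) :
    nicks.foldl (fun s n => if PySem.Str.isIn n name then some i else s) a0
      = if pvMatchAny nicks name then some i else a0 := by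
  induction nicks generalizing a0 with
  | nil => simp [pvMatchAny]
  | cons n t ih =>
    rw [List.foldl_cons]
    by_cases h : PySem.Str.isIn n name = true
    · simp only [if_pos h, ih]
      have hm : pvMatchAny (n :: t) name = true := by
        simp only [pvMatchAny, List.any_cons, h, Bool.true_or]
      rw [hm]; split <;> rfl
    · simp only [if_neg h, ih]
      have hm : pvMatchAny (n :: t) name = pvMatchAny t name := by
        simp only [pvMatchAny, List.any_cons, Bool.eq_false_iff.mpr h, Bool.false_or]
      rw [hm]

theorem hits_cons (nicks : List String) (x : String) (xs : List String) (s : Int) :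
    pvHits nicks (x :: xs) s
      = (if pvMatchAny nicks x then [s] else []) ++ pvHits nicks xs (s + 1) := by
  simp only [pvHits, PySem.List.enumerate_cons, List.filterMap_cons]
  by_cases h : pvMatchAny nicks x <;> simp [h]

theorem getLast?_cons_or (s : Int) (l : List Int) (a0 : Option Int) :
    (s :: l).getLast?.or a0 = l.getLast?.or (some s) := by
  cases h : l.getLast? <;> simp [List.getLast?_cons, h]

-- the fold of A equals (last U hit, last I hit) layered over the initial state
theorem foldA (xs : List String) (s : Int) (a0 b0 : Option Int) :
    (PySem.List.enumerate xs s).foldl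
      (fun (acc : Option Int × Option Int) p =>
        (List.foldl (fun t name_U0 => if PySem.Str.isIn name_U0 p.2 then some p.1 else t) acc.1 ["UZ", "Uz", "U0"],
         List.foldl (fun t name_I0 => if PySem.Str.isIn name_I0 p.2 then some p.1 else t) acc.2 ["IZ", "Iz", "I0"]))
      (a0, b0)
      = ((pvHits ["UZ", "Uz", "U0"] xs s).getLast?.or a0,
         (pvHits ["IZ", "Iz", "I0"] xs s).getLast?.or b0) := by
  induction xs generalizing s a0 b0 with
  | nil => simp [pvHits]
  | cons x t ih =>
    rw [PySem.List.enumerate_cons, List.foldl_cons, ih, hits_cons, hits_cons,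
        foldl_nick, foldl_nick]
    by_cases hU : pvMatchAny ["UZ", "Uz", "U0"] x <;>
      by_cases hI : pvMatchAny ["IZ", "Iz", "I0"] x <;>
        simp [hU, hI, getLast?_cons_or]

theorem mem_hits_ge (nicks : List String) (xs : List String) (s a : Int)
    (h : a ∈ pvHits nicks xs s) : s ≤ a := by
  induction xs generalizing s with
  | nil => simp [pvHits] at h
  | cons x t ih =>
    rw [hits_cons] at h
    rcases List.mem_append.mp h with h1 | h2
    · by_cases hm : pvMatchAny nicks x <;> simp [hm] at h1; omega
    · have := ih (s + 1) h2; omega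

theorem hits_ne_nil (nicks : List String) (xs : List String) (s : Int)
    (h : xs.any (fun name => pvMatchAny nicks name) = true) :
    pvHits nicks xs s ≠ [] := by
  induction xs generalizing s with
  | nil => simp at h
  | cons x t ih =>
    rw [hits_cons]
    simp only [List.any_cons, Bool.or_eq_true] at h
    rcases h with h | h
    · simp [h]
    · intro hc
      rcases List.append_eq_nil_iff.mp hc with ⟨_, h2⟩
      exact ih (s + 1) h h2

-- from Pre_: the last hit of the whole list exists and is ≥ 1
theorem last_hit_pos (nicks : List String) (x : String) (t : List String)
    (h : t.any (fun name => pvMatchAny nicks name) = true) :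
    ∃ a, (pvHits nicks (x :: t) 0).getLast? = some a ∧ 1 ≤ a := by
  have hne : pvHits nicks t 1 ≠ [] := hits_ne_nil nicks t 1 h
  have hlast : (pvHits nicks t 1).getLast? = some ((pvHits nicks t 1).getLast hne) :=
    List.getLast?_eq_some_getLast hne
  have h01 : (0 : Int) + 1 = 1 := by norm_num
  refine ⟨(pvHits nicks t 1).getLast hne, ?_, ?_⟩
  · rw [hits_cons, List.getLast?_append, h01, hlast]; rfl
  · exact mem_hits_ge nicks t 1 _ (List.getLast_mem hne)

-- a two-element list is an infix of x :: y :: t iff it is the head pair or an infix of the tail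
theorem pair_infix (a b x y : Char) (t : List Char) :
    ([a, b] <:+: x :: y :: t) ↔ (x = a ∧ y = b) ∨ [a, b] <:+: y :: t := by
  rw [List.infix_cons_iff]
  constructor
  · rintro (hp | h)
    · rcases List.cons_prefix_cons.mp hp with ⟨h1, hp2⟩
      rcases List.cons_prefix_cons.mp hp2 with ⟨h2, _⟩
      exact Or.inl ⟨h1.symm, h2.symm⟩
    · exact Or.inr h
  · rintro (⟨h1, h2⟩ | h)
    · exact Or.inl (List.cons_prefix_cons.mpr ⟨h1.symm, List.cons_prefix_cons.mpr ⟨h2.symm, List.nil_prefix⟩⟩)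
    · exact Or.inr h

-- the adjacent-pair scan decides exactly the three 2-character substrings u+'Z', u+'z', u+'0'
theorem hasAdj_iff (u : Char) (cs : List Char) :
    pvHasAdj u cs = true ↔ ([u, 'Z'] <:+: cs ∨ [u, 'z'] <:+: cs ∨ [u, '0'] <:+: cs) := by
  induction cs with
  | nil => simp [pvHasAdj]
  | cons x t ih =>
    cases t with
    | nil =>
      constructor
      · intro h; simp [pvHasAdj] at h
      · rintro (h | h | h) <;>
          · have := h.sublist.length_le; simp at this
    | cons y t' =>
      have hstep : pvHasAdj u (x :: y :: t') = ((x == u && pvInZ y) || pvHasAdj u (y :: t')) := by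
        simp [pvHasAdj]
      rw [hstep, pair_infix, pair_infix, pair_infix]
      simp only [Bool.or_eq_true, Bool.and_eq_true, beq_iff_eq, pvInZ, ih]
      tauto

theorem flags_fst (s : String) : (pvFlags s).1 = pvMatchAny ["UZ", "Uz", "U0"] s := by
  rw [Bool.eq_iff_iff]
  have h1 : ("UZ" : String).toList = ['U', 'Z'] := by decide
  have h2 : ("Uz" : String).toList = ['U', 'z'] := by decide
  have h3 : ("U0" : String).toList = ['U', '0'] := by decide
  simp only [pvFlags, pvMatchAny, List.any_cons, List.any_nil, Bool.or_eq_true,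
    Bool.or_false, PySem.Str.isIn_iff_infix, h1, h2, h3, hasAdj_iff]

theorem flags_snd (s : String) : (pvFlags s).2 = pvMatchAny ["IZ", "Iz", "I0"] s := by
  rw [Bool.eq_iff_iff]
  have h1 : ("IZ" : String).toList = ['I', 'Z'] := by decide
  have h2 : ("Iz" : String).toList = ['I', 'z'] := by decide
  have h3 : ("I0" : String).toList = ['I', '0'] := by decide
  simp only [pvFlags, pvMatchAny, List.any_cons, List.any_nil, Bool.or_eq_true,
    Bool.or_false, PySem.Str.isIn_iff_infix, h1, h2, h3, hasAdj_iff]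

-- B's loop with early break computes first-found-from-the-front of its index list
theorem loopB (xs : List String) (l : List Int) (u v : Option Int) :
    pvLoopB xs l u v
      = (u.or (l.findSome? (fun i => if (pvFlags (PySem.List.pyGetD xs i "")).1 then some i else none)),
         v.or (l.findSome? (fun i => if (pvFlags (PySem.List.pyGetD xs i "")).2 then some i else none))) := by
  induction l generalizing u v with
  | nil => simp [pvLoopB]
  | cons i rest ih =>
    simp only [pvLoopB]
    cases u <;> cases v <;>
      by_cases h1 : (pvFlags (PySem.List.pyGetD xs i "")).1 <;>
        by_cases h2 : (pvFlags (PySem.List.pyGetD xs i "")).2 <;>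
          simp [ih, h1, h2, Option.or]

-- the filterMap over forward indices is exactly the last-match list of A's characterisation
theorem filterMap_hits_fst (xs : List String) :
    (PySem.List.pyRange 0 (PySem.List.len xs) 1).filterMap
        (fun i => if (pvFlags (PySem.List.pyGetD xs i "")).1 then some i else none)
      = pvHits ["UZ", "Uz", "U0"] xs 0 := by
  rw [pvHits, PySem.List.enumerate_eq_map_pyRange xs "", List.filterMap_map]
  exact List.filterMap_congr (fun i _ => by simp [flags_fst])

theorem filterMap_hits_snd (xs : List String) :
    (PySem.List.pyRange 0 (PySem.List.len xs) 1).filterMap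
        (fun i => if (pvFlags (PySem.List.pyGetD xs i "")).2 then some i else none)
      = pvHits ["IZ", "Iz", "I0"] xs 0 := by
  rw [pvHits, PySem.List.enumerate_eq_map_pyRange xs "", List.filterMap_map]
  exact List.filterMap_congr (fun i _ => by simp [flags_snd])

-- B computes (last U hit, last I hit) of the same hit lists
theorem altB (xs : List String) :
    find_id_of_U0_I0_alt xs
      = (match (pvHits ["UZ", "Uz", "U0"] xs 0).getLast? with
         | none => ((0 : Int), (0 : Int))
         | some a =>
           match (pvHits ["IZ", "Iz", "I0"] xs 0).getLast? with
           | none => ((0 : Int), (0 : Int))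
           | some b => (a, b)) := by
  have hrange : PySem.List.pyRange (PySem.List.len xs - 1) (-1) (-1)
      = (PySem.List.pyRange 0 (PySem.List.len xs) 1).reverse := by
    rw [PySem.List.pyRange_neg_one_eq_reverse]
    norm_num
  rw [find_id_of_U0_I0_alt, hrange, loopB]
  rw [← List.head?_filterMap, ← List.head?_filterMap, List.filterMap_reverse,
    List.filterMap_reverse, List.head?_reverse, List.head?_reverse,
    filterMap_hits_fst, filterMap_hits_snd]
  cases (pvHits ["UZ", "Uz", "U0"] xs 0).getLast? <;>
    cases (pvHits ["IZ", "Iz", "I0"] xs 0).getLast? <;> simp [Option.or]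

-- ===== VERDICT (by name: the statement is the Claim_ definition above) =====
theorem find_id_of_U0_I0_spec : Claim_equal_find_id_of_U0_I0 := by
  intro xs _ hpre
  unfold Spec_find_id_of_U0_I0
  obtain ⟨hU, hI⟩ := hpre
  rw [show (fun name => (["UZ", "Uz", "U0"] : List String).any (fun n => PySem.Str.isIn n name)) = (fun name => pvMatchAny ["UZ", "Uz", "U0"] name) from rfl] at hU
  rw [show (fun name => (["IZ", "Iz", "I0"] : List String).any (fun n => PySem.Str.isIn n name)) = (fun name => pvMatchAny ["IZ", "Iz", "I0"] name) from rfl] at hI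
  cases xs with
  | nil => simp at hU
  | cons x t =>
    simp only [List.drop_one, List.tail_cons] at hU hI
    obtain ⟨a, ha, ha1⟩ := last_hit_pos ["UZ", "Uz", "U0"] x t hU
    obtain ⟨b, hb, hb1⟩ := last_hit_pos ["IZ", "Iz", "I0"] x t hI
    have hA : find_id_of_U0_I0 (x :: t) = (a, b) := by
      simp only [find_id_of_U0_I0]
      rw [foldA, ha, hb]
      have hab : a ≠ 0 ∧ b ≠ 0 := ⟨by omega, by omega⟩
      simp [Option.or, hab]
    have hB : find_id_of_U0_I0_alt (x :: t) = (a, b) := by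
      rw [altB, ha, hb]
    rw [hA, hB]
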